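-- pv_equiv track=rewrite | github.com/jimmy-academia/xnot | data/scripts/review_utils.py | bucket_reviews_by_star
-- ===== SOURCE A (Python) =====
-- def bucket_reviews_by_star(reviews: list) -> dict:
--     """Bucket reviews by star rating (1-5), sorted by length within each bucket.
--
--     Args:
--         reviews: List of review dicts with 'stars' and 'text' fields
--
--     Returns:
--         Dict mapping star rating (1-5) to list of reviews, sorted by text length descending
--     """
--     buckets = {1: [], 2: [], 3: [], 4: [], 5: []}
--     for r in reviews:
--         star = int(r.get("stars", 3))
--         star = max(1, min(5, star))  # Clamp to 1-5
--         buckets[star].append(r)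
--
--     # Sort each bucket by text length (longest first)
--     for star in buckets:
--         buckets[star].sort(key=lambda r: -len(r.get("text", "")))
--
--     return buckets
-- ===== SOURCE B (Python) =====
-- def bucket_reviews_by_star(reviews: list) -> dict:
--     """Bucket reviews by star rating (1-5), sorted by length within each bucket.
--
--     No mutable bucket accumulation: for each star value 1..5, select the
--     matching reviews with a filter pass and sort that selection directly,
--     building the result dict by comprehension.
--     """
--     def clamp(r):
--         return max(1, min(5, int(r.get("stars", 3))))
--     return {
--         s: sorted((r for r in reviews if clamp(r) == s),
--                   key=lambda r: -len(r.get("text", "")))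
--         for s in range(1, 6)
--     }
-- ===== Notes on version B (the rewrite author's own statement) =====
-- stated objective: simpler
-- what changed: Instead of mutating a dict of buckets in a loop and then sorting each bucket in a second pass, B builds the result by a dict comprehension over the five star values, with each bucket produced directly as sorted(filter) of the input.
import Mathlib
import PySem

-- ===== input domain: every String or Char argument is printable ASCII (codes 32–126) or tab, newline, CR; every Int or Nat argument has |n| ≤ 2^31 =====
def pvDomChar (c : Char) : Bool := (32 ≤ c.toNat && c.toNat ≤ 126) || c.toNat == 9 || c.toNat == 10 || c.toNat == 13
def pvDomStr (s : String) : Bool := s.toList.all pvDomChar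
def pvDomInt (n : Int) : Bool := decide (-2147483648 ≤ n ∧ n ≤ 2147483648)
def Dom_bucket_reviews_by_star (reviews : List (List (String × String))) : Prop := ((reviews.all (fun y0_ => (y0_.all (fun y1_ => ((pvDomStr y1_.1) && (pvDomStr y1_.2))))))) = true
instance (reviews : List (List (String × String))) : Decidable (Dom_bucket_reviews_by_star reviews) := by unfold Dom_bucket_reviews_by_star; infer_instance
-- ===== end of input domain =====

-- B replaces A's "mutate a bucket dict in a loop, then sort each bucket" by a direct
-- comprehension over the five star values, each bucket built as sorted(filter) (simpler).


-- shared helper (both Pythons contain this exact subexpression)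
-- star = max(1, min(5, int(r.get("stars", 3))))  (total form: the getD 0 arm is
-- unreachable under Pre_, which demands int(r["stars"]) not raise)
def pvStar (r : List (String × String)) : Int :=
  let star : Int :=
    match List.lookup "stars" r with
    | some v => (PySem.Int.ofStr? v).getD 0
    | none => 3
  max 1 (min 5 star)

-- -len(r.get("text", ""))
def pvNegLen (r : List (String × String)) : Int :=
  -(PySem.Str.len ((List.lookup "text" r).getD ""))

-- ===== PORT A =====
-- buckets = {1: [], 2: [], 3: [], 4: [], 5: []}
def pvInitBuckets : PySem.Dict Int (List (List (String × String))) :=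
  PySem.Dict.ofList [(1, []), (2, []), (3, []), (4, []), (5, [])]

def bucket_reviews_by_star (reviews : List (List (String × String))) : List (Int × List (List (String × String))) :=
  -- for r in reviews: buckets[star].append(r); then
  -- for star in buckets: buckets[star].sort(key=lambda r: -len(r.get("text","")))
  (reviews.foldl (fun d r => d.modify (pvStar r) [] (· ++ [r])) pvInitBuckets).items.map
    (fun p => (p.1, PySem.List.sorted p.2 pvNegLen))

-- ===== PORT B =====
-- {s: sorted((r for r in reviews if clamp(r) == s), key=...) for s in range(1, 6)}
def bucket_reviews_by_star_alt (reviews : List (List (String × String))) : List (Int × List (List (String × String))) :=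
  (PySem.List.pyRange 1 6 1).map
    (fun s => (s, PySem.List.sorted (reviews.filter (fun r => pvStar r == s)) pvNegLen))

-- ===== PRECONDITION & SPEC =====
-- Pre_ excludes exactly the inputs where int(r["stars"]) raises ValueError in both A and B.
def pvStarsOk (r : List (String × String)) : Bool :=
  match List.lookup "stars" r with
  | some v => (PySem.Int.ofStr? v).isSome
  | none => true

def Pre_bucket_reviews_by_star (reviews : List (List (String × String))) : Prop :=
  ∀ r ∈ reviews, pvStarsOk r = true
instance (reviews : List (List (String × String))) : Decidable (Pre_bucket_reviews_by_star reviews) := by unfold Pre_bucket_reviews_by_star; infer_instance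

def pvWitness_bucket_reviews_by_star : (List (List (String × String))) :=
  [[("stars", "4"), ("text", "good")], [("stars", "4"), ("text", "ok")], [("text", "no stars")]]

def Spec_bucket_reviews_by_star (reviews : List (List (String × String))) (out : List (Int × List (List (String × String)))) : Prop := out = bucket_reviews_by_star_alt reviews
instance (reviews : List (List (String × String))) (out : List (Int × List (List (String × String)))) : Decidable (Spec_bucket_reviews_by_star reviews out) := by unfold Spec_bucket_reviews_by_star; infer_instance

-- ===== CLAIM (what is proved, stated in full; the proofs are below) =====
def Claim_equal_bucket_reviews_by_star : Prop := ∀ (reviews : List (List (String × String))), Dom_bucket_reviews_by_star reviews → Pre_bucket_reviews_by_star reviews → Spec_bucket_reviews_by_star reviews (bucket_reviews_by_star reviews)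

-- ===== LEMMAS AND PROOFS =====

-- the grouping fold, per key
lemma pv_getD_fold (xs : List (List (String × String)))
    (d : PySem.Dict Int (List (List (String × String)))) (c : Int) :
    (xs.foldl (fun d r => d.modify (pvStar r) [] (· ++ [r])) d).getD c []
      = d.getD c [] ++ xs.filter (fun r => pvStar r == c) := by
  have hmap : xs.foldl (fun d r => d.modify (pvStar r) [] (· ++ [r])) d
      = (xs.map (fun r => (pvStar r, r))).foldl (fun d p => d.modify p.1 [] (· ++ [p.2])) d := by
    rw [List.foldl_map]
  rw [hmap, PySem.Dict.getD_foldl_modify_append, List.filter_map, List.map_map]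
  simp [Function.comp_def]

lemma pv_star_mem (r : List (String × String)) : pvStar r ∈ ([1, 2, 3, 4, 5] : List Int) := by
  have h1 : (1 : Int) ≤ pvStar r := le_max_left _ _
  have h5 : pvStar r ≤ 5 := max_le (by norm_num) (min_le_left _ _)
  simp only [List.mem_cons]
  omega

lemma pv_keys_fold (xs : List (List (String × String))) :
    (xs.foldl (fun d r => d.modify (pvStar r) [] (· ++ [r])) pvInitBuckets).keys
      = ([1, 2, 3, 4, 5] : List Int) := by
  rw [PySem.Dict.keys_foldl_modify_key xs pvStar [] (fun _ r v => v ++ [r]) pvInitBuckets]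
  have hkeys : pvInitBuckets.keys = ([1, 2, 3, 4, 5] : List Int) := by decide
  rw [hkeys, PySem.Set.update_eq_append_filter]
  have : (PySem.Set.ofList (xs.map pvStar)).filter
      (fun y => !(PySem.Set.contains ([1, 2, 3, 4, 5] : List Int) y)) = [] := by
    rw [List.filter_eq_nil_iff]
    intro y hy
    have hy' : y ∈ xs.map pvStar := by simpa [PySem.Set.mem_ofList] using hy
    rcases List.mem_map.mp hy' with ⟨r, -, rfl⟩
    simp [PySem.Set.contains_eq_listContains, pv_star_mem r]
  rw [this, List.append_nil]

lemma pv_initGetD (c : Int) (hc : c ∈ ([1, 2, 3, 4, 5] : List Int)) :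
    pvInitBuckets.getD c [] = [] := by
  have h : c = 1 ∨ c = 2 ∨ c = 3 ∨ c = 4 ∨ c = 5 := by simpa using hc
  rcases h with rfl | rfl | rfl | rfl | rfl <;> decide

-- ===== VERDICT (by name: the statement is the Claim_ definition above) =====
theorem bucket_reviews_by_star_spec : Claim_equal_bucket_reviews_by_star := by
  intro reviews _ _
  unfold Spec_bucket_reviews_by_star bucket_reviews_by_star bucket_reviews_by_star_alt
  have hnd : (reviews.foldl (fun d r => d.modify (pvStar r) [] (· ++ [r])) pvInitBuckets).keys.Nodup := by
    rw [pv_keys_fold]; decide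
  have hrange : PySem.List.pyRange 1 6 1 = ([1, 2, 3, 4, 5] : List Int) := by decide
  rw [PySem.Dict.items_eq_map_keys _ hnd [], pv_keys_fold, List.map_map, hrange]
  apply List.map_congr_left
  intro c hc
  simp only [Function.comp_apply]
  rw [pv_getD_fold, pv_initGetD c hc, List.nil_append]
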